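-- pv_equiv track=rewrite | github.com/vincentToString/PROwl | intake/compression/utils.py | remove_deletion_only_hunks
-- ===== SOURCE A (Python) =====
-- def remove_deletion_only_hunks(patch: str) -> str:
--     """
--     Remove hunks that only contain deletions
--     (Qodo AI strategy)
--     """
--     lines = patch.split('\n')
--     result = []
--     current_hunk = []
--     in_hunk = False
--     hunk_has_additions = False
--
--     for line in lines:
--         if line.startswith('@@'):
--             # Save previous hunk if it had additions
--             if in_hunk and hunk_has_additions:
--                 result.extend(current_hunk)
--
--             # Start new hunk
--             current_hunk = [line]
--             in_hunk = True
--             hunk_has_additions = False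
--         elif in_hunk:
--             current_hunk.append(line)
--             if line.startswith('+') and not line.startswith('+++'):
--                 hunk_has_additions = True
--         else:
--             result.append(line)
--
--     # Don't forget last hunk
--     if in_hunk and hunk_has_additions:
--         result.extend(current_hunk)
--
--     return '\n'.join(result)
-- ===== SOURCE B (Python) =====
-- def remove_deletion_only_hunks(patch: str) -> str:
--     """
--     Remove hunks that only contain deletions
--     (Qodo AI strategy)
--     """
--     lines = patch.split('\n')
--     # preamble: everything before the first '@@' header, always kept
--     i = 0
--     while i < len(lines) and not lines[i].startswith('@@'):
--         i += 1
--     preamble = lines[:i]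
--     # group the rest into hunks: each hunk is a header plus following non-header lines
--     hunks = []
--     while i < len(lines):
--         j = i + 1
--         while j < len(lines) and not lines[j].startswith('@@'):
--             j += 1
--         hunks.append(lines[i:j])
--         i = j
--     kept = [h for h in hunks
--             if any(l.startswith('+') and not l.startswith('+++') for l in h)]
--     return '\n'.join(preamble + [l for h in kept for l in h])
-- ===== Notes on version B (the rewrite author's own statement) =====
-- stated objective: alternative
-- what changed: Replaced A's single streaming pass with flag state (in_hunk, hunk_has_additions, current_hunk) by an explicit group-then-filter decomposition: split lines into preamble + list of hunks, keep hunks containing an addition line, then flatten and join.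
import Mathlib
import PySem

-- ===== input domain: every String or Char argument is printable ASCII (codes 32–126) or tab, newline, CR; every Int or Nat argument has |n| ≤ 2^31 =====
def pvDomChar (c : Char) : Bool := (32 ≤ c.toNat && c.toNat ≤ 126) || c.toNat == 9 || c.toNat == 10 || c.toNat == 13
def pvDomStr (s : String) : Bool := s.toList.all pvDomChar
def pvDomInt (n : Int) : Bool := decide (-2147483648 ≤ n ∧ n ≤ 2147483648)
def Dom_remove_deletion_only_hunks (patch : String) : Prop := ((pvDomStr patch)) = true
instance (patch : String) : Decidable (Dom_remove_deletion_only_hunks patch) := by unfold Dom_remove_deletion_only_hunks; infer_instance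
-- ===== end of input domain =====

-- B replaces A's streaming flag-based single pass by an explicit group-then-filter
-- decomposition (preamble + list of hunks, filter hunks with additions, flatten); same cost.

-- ===== PORT A =====
-- shared line predicates (used by both ports)
def pvIsHdr (l : String) : Bool := PySem.Str.startswith l "@@"
def pvHasAdd (l : String) : Bool := PySem.Str.startswith l "+" && !PySem.Str.startswith l "+++"

-- one iteration of A's for-loop: state = (result, current_hunk, in_hunk, hunk_has_additions)
def pvStepA (st : List String × List String × Bool × Bool) (line : String) :
    List String × List String × Bool × Bool :=
  match st with
  | (result, current, inHunk, hasAdd) =>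
    if pvIsHdr line then
      ((if inHunk && hasAdd then result ++ current else result), [line], true, false)
    else if inHunk then
      (result, current ++ [line], true, hasAdd || pvHasAdd line)
    else
      (result ++ [line], current, inHunk, hasAdd)

def remove_deletion_only_hunks (patch : String) : String :=
  let lines := (PySem.Str.split? patch "\n").getD []
  let st := lines.foldl pvStepA ([], [], false, false)
  PySem.Str.join "\n" (if st.2.2.1 && st.2.2.2 then st.1 ++ st.2.1 else st.1)

-- ===== PORT B =====
-- group the post-preamble lines into hunks: header line plus following non-header lines
def pvHunks : List String → List (List String)
  | [] => []
  | l :: ls =>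
      (l :: ls.takeWhile (fun x => !pvIsHdr x)) :: pvHunks (ls.dropWhile (fun x => !pvIsHdr x))
termination_by ls => ls.length
decreasing_by
  simpa using Nat.lt_succ_of_le (List.length_dropWhile_le _ _)

def remove_deletion_only_hunks_alt (patch : String) : String :=
  let lines := (PySem.Str.split? patch "\n").getD []
  let preamble := lines.takeWhile (fun l => !pvIsHdr l)
  let rest := lines.dropWhile (fun l => !pvIsHdr l)
  let kept := (pvHunks rest).filter (fun h => h.any pvHasAdd)
  PySem.Str.join "\n" (preamble ++ kept.flatten)

-- ===== PRECONDITION & SPEC =====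
def Spec_remove_deletion_only_hunks (patch : String) (out : String) : Prop := out = remove_deletion_only_hunks_alt patch
instance (patch : String) (out : String) : Decidable (Spec_remove_deletion_only_hunks patch out) := by unfold Spec_remove_deletion_only_hunks; infer_instance

-- ===== CLAIM (what is proved, stated in full; the proofs are below) =====
def Claim_equal_remove_deletion_only_hunks : Prop := ∀ (patch : String), Dom_remove_deletion_only_hunks patch → Spec_remove_deletion_only_hunks patch (remove_deletion_only_hunks patch)

-- ===== LEMMAS AND PROOFS =====

-- A's final read-out of the loop state
def pvFinish (st : List String × List String × Bool × Bool) : List String :=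
  if st.2.2.1 && st.2.2.2 then st.1 ++ st.2.1 else st.1

-- kept hunks, flattened (B's final list after the preamble)
def pvKept (hs : List (List String)) : List String :=
  (hs.filter (fun h => h.any pvHasAdd)).flatten

lemma pvHdr_not_add (l : String) (h : pvIsHdr l = true) : pvHasAdd l = false := by
  unfold pvIsHdr at h
  unfold pvHasAdd
  simp only [PySem.Str.startswith_eq] at *
  rcases (PySem.Chars.startswith_iff _ _).mp h with ⟨t1, e1⟩
  cases hp : PySem.Chars.startswith l.toList "+".toList
  · simp
  · rcases (PySem.Chars.startswith_iff _ _).mp hp with ⟨t2, e2⟩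
    rw [← e1] at e2
    simp at e2

lemma pvInHunk (ls : List String) : ∀ (res cur : List String) (has : Bool),
    pvFinish (ls.foldl pvStepA (res, cur, true, has)) =
      res ++ (if has || (ls.takeWhile (fun x => !pvIsHdr x)).any pvHasAdd
                then cur ++ ls.takeWhile (fun x => !pvIsHdr x) else [])
          ++ pvKept (pvHunks (ls.dropWhile (fun x => !pvIsHdr x))) := by
  induction ls with
  | nil =>
    intro res cur has
    simp [pvFinish, pvKept, pvHunks]
    cases has <;> simp
  | cons l ls ih =>
    intro res cur has
    cases hl : pvIsHdr l with
    | false =>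
      have hst : pvStepA (res, cur, true, has) l = (res, cur ++ [l], true, has || pvHasAdd l) := by
        simp [pvStepA, hl]
      rw [List.foldl_cons, hst, ih]
      simp [hl, Bool.or_assoc]
    | true =>
      have hst : pvStepA (res, cur, true, has) l =
          ((if has then res ++ cur else res), [l], true, false) := by
        simp [pvStepA, hl]
      rw [List.foldl_cons, hst, ih]
      rw [List.takeWhile_cons, List.dropWhile_cons]
      simp only [hl, Bool.not_true, Bool.false_eq_true, ite_false]
      rw [pvHunks]
      unfold pvKept
      simp only [List.filter_cons, List.any_cons, pvHdr_not_add l hl, Bool.false_or]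
      cases has <;> cases hadd : (ls.takeWhile (fun x => !pvIsHdr x)).any pvHasAdd <;>
        simp [hadd]

lemma pvPre (ls : List String) : ∀ (res cur : List String) (has : Bool),
    pvFinish (ls.foldl pvStepA (res, cur, false, has)) =
      res ++ ls.takeWhile (fun x => !pvIsHdr x)
          ++ pvKept (pvHunks (ls.dropWhile (fun x => !pvIsHdr x))) := by
  induction ls with
  | nil =>
    intro res cur has
    simp [pvFinish, pvKept, pvHunks]
  | cons l ls ih =>
    intro res cur has
    cases hl : pvIsHdr l with
    | false =>
      have hst : pvStepA (res, cur, false, has) l = (res ++ [l], cur, false, has) := by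
        simp [pvStepA, hl]
      rw [List.foldl_cons, hst, ih]
      simp [hl]
    | true =>
      have hst : pvStepA (res, cur, false, has) l = (res, [l], true, false) := by
        simp [pvStepA, hl]
      rw [List.foldl_cons, hst, pvInHunk]
      rw [List.takeWhile_cons, List.dropWhile_cons]
      simp only [hl, Bool.not_true, Bool.false_eq_true, ite_false]
      rw [pvHunks]
      unfold pvKept
      simp only [List.filter_cons, List.any_cons, pvHdr_not_add l hl, Bool.false_or]
      cases hadd : (ls.takeWhile (fun x => !pvIsHdr x)).any pvHasAdd <;> simp [hadd]

-- ===== VERDICT (by name: the statement is the Claim_ definition above) =====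
theorem remove_deletion_only_hunks_spec : Claim_equal_remove_deletion_only_hunks := by
  intro patch _
  unfold Spec_remove_deletion_only_hunks remove_deletion_only_hunks remove_deletion_only_hunks_alt
  simp only []
  have h := pvPre ((PySem.Str.split? patch "\n").getD []) [] [] false
  unfold pvFinish at h
  simp only [List.nil_append] at h
  rw [h]
  rfl
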